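-- pv_equiv track=rewrite | github.com/zeylanica/programmers | Level1_문자열_내림차순으로_배치하기.py | solution
-- ===== SOURCE A (Python) =====
-- def solution(s):
--     string = ""
--     answer = sorted(s,key=str.lower, reverse=True)
--     answer2 = []
--     for idx in answer:
--         if idx.isupper() :
--             answer2.append(idx)
--     for idx in answer2:
--         if idx in answer:
--             answer.remove(idx)
--     answer2 = sorted(answer2, key=str.upper, reverse=True)
--     answer.extend(answer2)
--     for idx in answer:
--         string = string + idx
--     return string
-- ===== SOURCE B (Python) =====
-- def solution(s):
--     # One keyed sort: non-uppercase chars first, descending; uppercase last, descending.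
--     return "".join(sorted(s, key=lambda c: (not c.isupper(), c.lower()), reverse=True))
-- ===== Notes on version B (the rewrite author's own statement) =====
-- stated objective: simpler
-- what changed: Replaces A's full stable sort + uppercase filter + per-element remove() loop + second sort + character-by-character string rebuild with a single composite-key sort ((not isupper, lower), reverse=True) and one join.
import Mathlib
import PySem

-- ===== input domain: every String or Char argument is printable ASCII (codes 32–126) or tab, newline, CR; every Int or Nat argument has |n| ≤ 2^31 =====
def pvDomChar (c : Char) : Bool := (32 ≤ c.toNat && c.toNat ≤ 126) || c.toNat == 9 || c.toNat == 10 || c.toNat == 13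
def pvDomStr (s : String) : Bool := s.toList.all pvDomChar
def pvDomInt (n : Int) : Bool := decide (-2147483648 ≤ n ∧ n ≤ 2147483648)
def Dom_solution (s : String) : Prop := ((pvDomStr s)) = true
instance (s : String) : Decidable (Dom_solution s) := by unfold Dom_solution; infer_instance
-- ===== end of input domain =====

-- B replaces A's sort + filter + remove-loop + second sort + char-by-char rebuild by a single
-- composite-key sort and one join (objective: simpler).

-- ===== PORT A =====
def solution (s : String) : String :=
  let answer := PySem.List.sorted s.toList (fun c => PySem.Chars.lowerChar c) true
  let answer2 := answer.foldl (fun acc idx => if PySem.Chars.isupper idx then acc ++ [idx] else acc) ([] : List Char)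
  let answerR := answer2.foldl (fun ans idx => if ans.contains idx then (PySem.List.remove? ans idx).getD ans else ans) answer
  let answer2s := PySem.List.sorted answer2 (fun c => PySem.Chars.upperChar c) true
  let answerF := answerR ++ answer2s
  answerF.foldl (fun string idx => string.push idx) ""

-- ===== PORT B =====
def solution_alt (s : String) : String :=
  String.ofList (PySem.List.sorted2 s.toList (fun c => !PySem.Chars.isupper c) (fun c => PySem.Chars.lowerChar c) true)

-- ===== PRECONDITION & SPEC =====
def Spec_solution (s : String) (out : String) : Prop := out = solution_alt s
instance (s : String) (out : String) : Decidable (Spec_solution s out) := by unfold Spec_solution; infer_instance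

-- ===== CLAIM (what is proved, stated in full; the proofs are below) =====
def Claim_equal_solution : Prop := ∀ (s : String), Dom_solution s → Spec_solution s (solution s)

-- ===== LEMMAS AND PROOFS =====

-- Char order is the order of code points (definitional).
theorem pvCharLe (a b : Char) : (a ≤ b) ↔ a.toNat ≤ b.toNat := Iff.rfl
theorem pvCharLt (a b : Char) : (a < b) ↔ a.toNat < b.toNat := Iff.rfl

theorem pvIsupper_iff (c : Char) : PySem.Chars.isupper c = true ↔ 65 ≤ c.toNat ∧ c.toNat ≤ 90 := by
  simp [PySem.Chars.isupper]
  exact Iff.rfl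

theorem pvLower_upper (c : Char) (h : PySem.Chars.isupper c = true) :
    (PySem.Chars.lowerChar c).toNat = c.toNat + 32 := by
  have h' := (pvIsupper_iff c).mp h
  have hv : (c.toNat + 32).isValidChar := Or.inl (by omega)
  have h2 := h'.2
  simp [PySem.Chars.lowerChar, h, Char.ofNat, hv, Char.ofNatAux]
  omega

theorem pvLower_nonupper (c : Char) (h : PySem.Chars.isupper c = false) :
    PySem.Chars.lowerChar c = c := by
  simp [PySem.Chars.lowerChar, h]

theorem pvUpper_upper (c : Char) (h : PySem.Chars.isupper c = true) :
    PySem.Chars.upperChar c = c := by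
  have h' := (pvIsupper_iff c).mp h
  have hl : PySem.Chars.islower c = false := by
    simp [PySem.Chars.islower, decide_eq_false_iff_not]
    intro hc
    have : (97 : Nat) ≤ c.toNat := hc
    omega
  simp [PySem.Chars.upperChar, hl]

-- The single composite key used for the common characterisation of both ports:
-- uppercase letters get small keys (their lowercase code point), everything else large keys.
def pvKey (c : Char) : Int :=
  if PySem.Chars.isupper c then ((c.toNat : Int) + 32) else (2097152 + (c.toNat : Int))

theorem pvKey_up_le (c : Char) (h : PySem.Chars.isupper c = true) : pvKey c ≤ 122 := by
  have h' := (pvIsupper_iff c).mp h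
  unfold pvKey
  rw [if_pos h]
  omega

theorem pvKey_nonup_ge (c : Char) (h : PySem.Chars.isupper c = false) : 2097152 ≤ pvKey c := by
  unfold pvKey
  rw [if_neg (by simp [h])]
  omega

theorem pvKey_inj : Function.Injective pvKey := by
  intro a b hk
  by_cases ha : PySem.Chars.isupper a = true <;> by_cases hb : PySem.Chars.isupper b = true
  · simp [pvKey, ha, hb] at hk
    exact Char.ext (UInt32.toNat_inj.mp (by exact_mod_cast hk))
  · have := pvKey_up_le a ha
    have := pvKey_nonup_ge b (by simpa using hb)
    omega
  · have := pvKey_up_le b hb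
    have := pvKey_nonup_ge a (by simpa using ha)
    omega
  · simp [pvKey, ha, hb] at hk
    exact Char.ext (UInt32.toNat_inj.mp (by exact_mod_cast hk))

-- The comparison sorted2 makes with B's tuple key is exactly the comparison by pvKey.
theorem pvBefore_eq (a b : Char) :
    (decide ((!PySem.Chars.isupper b) < (!PySem.Chars.isupper a)) ||
      (!decide ((!PySem.Chars.isupper a) < (!PySem.Chars.isupper b)) &&
        decide (PySem.Chars.lowerChar b < PySem.Chars.lowerChar a)))
    = decide (pvKey b < pvKey a) := by
  by_cases ha : PySem.Chars.isupper a = true <;> by_cases hb : PySem.Chars.isupper b = true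
  · have hub := (pvIsupper_iff b).mp hb
    have hua := (pvIsupper_iff a).mp ha
    have h1 : (PySem.Chars.lowerChar b < PySem.Chars.lowerChar a) ↔ (pvKey b < pvKey a) := by
      rw [pvCharLt, pvLower_upper a ha, pvLower_upper b hb]
      simp [pvKey, ha, hb]
    simp [ha, hb, decide_eq_decide.mpr h1]
  · have hb' : PySem.Chars.isupper b = false := by simpa using hb
    have h1 := pvKey_up_le a ha
    have h2 := pvKey_nonup_ge b hb'
    have hno : ¬ (pvKey b < pvKey a) := by omega
    simp [ha, hb', hno, Bool.lt_iff]
  · have ha' : PySem.Chars.isupper a = false := by simpa using ha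
    have h1 := pvKey_up_le b hb
    have h2 := pvKey_nonup_ge a ha'
    have hyes : pvKey b < pvKey a := by omega
    simp [ha', hb, hyes, Bool.lt_iff]
  · have ha' : PySem.Chars.isupper a = false := by simpa using ha
    have hb' : PySem.Chars.isupper b = false := by simpa using hb
    have h1 : (PySem.Chars.lowerChar b < PySem.Chars.lowerChar a) ↔ (pvKey b < pvKey a) := by
      rw [pvLower_nonupper a ha', pvLower_nonupper b hb', pvCharLt]
      simp [pvKey, ha', hb']
    simp [ha', hb', decide_eq_decide.mpr h1]

-- B's tuple-key sort is the pvKey sort (same insertion sort, pointwise-equal comparison).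
theorem pvB_eq (cs : List Char) :
    PySem.List.sorted2 cs (fun c => !PySem.Chars.isupper c) (fun c => PySem.Chars.lowerChar c) true
      = PySem.List.sorted cs (fun c => pvKey c) true := by
  rw [PySem.List.sorted_rev_eq_foldl_insertBy]
  simp only [PySem.List.sorted2]
  congr 1
  funext acc x
  congr 1
  funext a b
  exact pvBefore_eq a b

-- Removing each value of a (value-determined) sublist removes exactly those elements.
theorem pvFoldlErase_ne (x : Char) : ∀ (vs l : List Char), (∀ c ∈ vs, c ≠ x) →
    vs.foldl List.erase (x :: l) = x :: vs.foldl List.erase l := by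
  intro vs
  induction vs with
  | nil => intro l _; rfl
  | cons c t ih =>
    intro l h
    have hcx : c ≠ x := h c (by simp)
    simp only [List.foldl_cons]
    rw [List.erase_cons_tail (by simpa using (Ne.symm hcx))]
    exact ih _ (fun d hd => h d (by simp [hd]))

theorem pvEraseFold (p : Char → Bool) : ∀ (l : List Char),
    (l.filter p).foldl List.erase l = l.filter (fun c => !p c) := by
  intro l
  induction l with
  | nil => rfl
  | cons x xs ih =>
    by_cases hp : p x = true
    · rw [List.filter_cons_of_pos hp]
      simp only [List.foldl_cons, List.erase_cons_head]
      simp [hp, ih]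
    · have hp' : p x = false := by simpa using hp
      rw [List.filter_cons_of_neg (by simp [hp'])]
      rw [pvFoldlErase_ne x (xs.filter p) xs]
      · simp [ih, hp']
      · intro c hc hcx
        have := List.of_mem_filter hc
        rw [hcx] at this
        simp [hp'] at this

-- A's guarded remove() step is List.erase.
theorem pvStep_eq (ans : List Char) (c : Char) :
    (if ans.contains c then (PySem.List.remove? ans c).getD ans else ans) = ans.erase c := by
  by_cases hc : c ∈ ans
  · rw [if_pos (by simpa using hc), PySem.List.remove?_eq_some_erase ans c hc]
    rfl
  · rw [if_neg (by simpa using hc), List.erase_of_not_mem hc]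

theorem pvFoldlPush (l : List Char) (acc : String) :
    (List.foldl (fun st c => st.push c) acc l).toList = acc.toList ++ l := by
  induction l generalizing acc with
  | nil => simp
  | cons c t ih => simp [ih, String.toList_push]

-- pvKey comparisons inside / across the two groups.
theorem pvKey_le_nonup (a b : Char) (ha : PySem.Chars.isupper a = false)
    (hb : PySem.Chars.isupper b = false)
    (h : PySem.Chars.lowerChar b ≤ PySem.Chars.lowerChar a) : pvKey b ≤ pvKey a := by
  rw [pvLower_nonupper a ha, pvLower_nonupper b hb, pvCharLe] at h
  simp [pvKey, ha, hb]; omega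

theorem pvKey_le_up (a b : Char) (ha : PySem.Chars.isupper a = true)
    (hb : PySem.Chars.isupper b = true)
    (h : PySem.Chars.upperChar b ≤ PySem.Chars.upperChar a) : pvKey b ≤ pvKey a := by
  rw [pvUpper_upper a ha, pvUpper_upper b hb, pvCharLe] at h
  simp [pvKey, ha, hb]; omega

theorem pvKey_cross (a b : Char) (ha : PySem.Chars.isupper a = false)
    (hb : PySem.Chars.isupper b = true) : pvKey b ≤ pvKey a := by
  have := pvKey_up_le b hb
  have := pvKey_nonup_ge a ha
  omega

-- The heart: A's final character list IS the pvKey-descending sort of the input.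
theorem pvListEq (cs : List Char) :
    (PySem.List.sorted cs (fun c => PySem.Chars.lowerChar c) true).filter (fun c => !PySem.Chars.isupper c)
      ++ PySem.List.sorted ((PySem.List.sorted cs (fun c => PySem.Chars.lowerChar c) true).filter (fun c => PySem.Chars.isupper c)) (fun c => PySem.Chars.upperChar c) true
      = PySem.List.sorted cs (fun c => pvKey c) true := by
  set A := PySem.List.sorted cs (fun c => PySem.Chars.lowerChar c) true with hAdef
  set N := A.filter (fun c => !PySem.Chars.isupper c) with hN
  set U := PySem.List.sorted (A.filter (fun c => PySem.Chars.isupper c)) (fun c => PySem.Chars.upperChar c) true with hU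
  -- permutation
  have hperm : (N ++ U).Perm (PySem.List.sorted cs (fun c => pvKey c) true) := by
    have h1 : U.Perm (A.filter (fun c => PySem.Chars.isupper c)) := PySem.List.sorted_perm _ _ _
    have h2 : (N ++ U).Perm (N ++ A.filter (fun c => PySem.Chars.isupper c)) := List.Perm.append_left N h1
    have h3 : (N ++ A.filter (fun c => PySem.Chars.isupper c)).Perm A := by
      have hp := List.filter_append_perm (fun c => PySem.Chars.isupper c) A
      exact List.perm_append_comm.trans (by simpa using hp)
    have h4 : A.Perm cs := PySem.List.sorted_perm _ _ _
    have h5 : cs.Perm (PySem.List.sorted cs (fun c => pvKey c) true) :=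
      (PySem.List.sorted_perm _ _ _).symm
    exact ((h2.trans h3).trans h4).trans h5
  -- pairwise (descending pvKey) on the left
  have hpwA : A.Pairwise (fun a b => PySem.Chars.lowerChar b ≤ PySem.Chars.lowerChar a) :=
    PySem.List.sorted_pairwise_rev cs _
  have hpwN : N.Pairwise (fun a b => pvKey b ≤ pvKey a) := by
    refine List.Pairwise.imp_of_mem ?_ (hpwA.filter _)
    intro a b hma hmb h
    have ha : PySem.Chars.isupper a = false := by simpa using List.of_mem_filter hma
    have hb : PySem.Chars.isupper b = false := by simpa using List.of_mem_filter hmb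
    exact pvKey_le_nonup a b ha hb h
  have hpwU : U.Pairwise (fun a b => pvKey b ≤ pvKey a) := by
    refine List.Pairwise.imp_of_mem ?_ (PySem.List.sorted_pairwise_rev _ _)
    intro a b hma hmb h
    have ha : PySem.Chars.isupper a = true :=
      List.of_mem_filter ((PySem.List.mem_sorted _ _ _ _).mp hma)
    have hb : PySem.Chars.isupper b = true :=
      List.of_mem_filter ((PySem.List.mem_sorted _ _ _ _).mp hmb)
    exact pvKey_le_up a b ha hb h
  have hpwL : (N ++ U).Pairwise (fun a b => pvKey b ≤ pvKey a) := by
    rw [List.pairwise_append]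
    refine ⟨hpwN, hpwU, ?_⟩
    intro a hma b hmb
    have ha : PySem.Chars.isupper a = false := by simpa using List.of_mem_filter hma
    have hb : PySem.Chars.isupper b = true :=
      List.of_mem_filter ((PySem.List.mem_sorted _ _ _ _).mp hmb)
    exact pvKey_cross a b ha hb
  have hpwR : (PySem.List.sorted cs (fun c => pvKey c) true).Pairwise (fun a b => pvKey b ≤ pvKey a) :=
    PySem.List.sorted_pairwise_rev cs _
  -- uniqueness of a key-sorted permutation, for the injective ascending key -pvKey
  refine PySem.List.eq_of_perm_of_pairwise_le_of_injective (fun c => (-(pvKey c) : Int)) ?_ hperm ?_ ?_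
  · intro a b h
    exact pvKey_inj (neg_inj.mp h)
  · exact hpwL.imp (fun h => neg_le_neg h)
  · exact hpwR.imp (fun h => neg_le_neg h)

theorem pvMain (s : String) : solution s = solution_alt s := by
  apply String.toList_inj.mp
  simp only [solution, solution_alt, String.toList_ofList]
  rw [pvB_eq, pvFoldlPush]
  have hstep : (fun (ans : List Char) (idx : Char) =>
      if ans.contains idx then (PySem.List.remove? ans idx).getD ans else ans) = List.erase := by
    funext ans idx; exact pvStep_eq ans idx
  rw [PySem.List.foldl_append_if_eq_filter, hstep]
  rw [List.nil_append, pvEraseFold]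
  simpa using pvListEq s.toList

-- ===== VERDICT (by name: the statement is the Claim_ definition above) =====
theorem solution_spec : Claim_equal_solution := by
  intro s _
  exact pvMain s
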